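-- pv_equiv track=rewrite | github.com/lekocka2/466-Proj3 | kockale_a3.py | unique_genes
-- ===== SOURCE A (Python) =====
-- def common_genes(dict1, dict2):
--     set1 = set(dict1.keys())
--     set2 = set(dict2.keys())
--     set3 = set1.intersection(set2)
--     common_set = sorted(set3)
--
--     return common_set
--
-- def unique_genes(dict1, dict2):
--     common_set = common_genes(dict1, dict2)
--     unique_lung = set(dict1.keys())
--     unique_prot = set(dict2.keys())
--     # remove items in common set
--     for i in common_set:
--         unique_lung.remove(i)
--         unique_prot.remove(i)
--
--     return sorted(unique_lung), sorted(unique_prot)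
-- ===== SOURCE B (Python) =====
-- def unique_genes(dict1, dict2):
--     keys1 = set(dict1.keys())
--     keys2 = set(dict2.keys())
--     return sorted(keys1 - keys2), sorted(keys2 - keys1)
-- ===== Notes on version B (the rewrite author's own statement) =====
-- stated objective: simpler
-- what changed: Replaces A's two-phase decomposition (compute sorted intersection, then a per-element remove loop deleting each common key from both sets) with two direct set differences sorted once; the intermediate sorted common_set and the removal loop disappear.
import Mathlib
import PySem

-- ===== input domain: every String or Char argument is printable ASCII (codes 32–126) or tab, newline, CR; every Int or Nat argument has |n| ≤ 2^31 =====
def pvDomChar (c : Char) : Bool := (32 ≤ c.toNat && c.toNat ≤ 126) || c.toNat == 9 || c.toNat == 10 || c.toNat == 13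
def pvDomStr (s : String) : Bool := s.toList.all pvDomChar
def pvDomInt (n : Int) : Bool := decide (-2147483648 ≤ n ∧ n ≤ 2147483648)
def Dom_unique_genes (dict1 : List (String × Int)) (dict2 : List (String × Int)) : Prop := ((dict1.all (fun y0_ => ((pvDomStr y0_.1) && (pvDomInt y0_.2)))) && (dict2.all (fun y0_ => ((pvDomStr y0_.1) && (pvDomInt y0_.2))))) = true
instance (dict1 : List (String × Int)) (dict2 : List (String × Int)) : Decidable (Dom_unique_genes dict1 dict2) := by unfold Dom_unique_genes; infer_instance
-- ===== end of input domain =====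

-- B computes the two results directly as set differences (sorted once), dropping A's
-- intermediate sorted intersection and its per-element remove loop: simpler decomposition.


-- ===== PORT A =====
def common_genes (dict1 : List (String × Int)) (dict2 : List (String × Int)) : List String :=
  let set1 := PySem.Set.ofList (dict1.map Prod.fst)
  let set2 := PySem.Set.ofList (dict2.map Prod.fst)
  let set3 := PySem.Set.inter set1 set2
  PySem.List.sorted set3 (fun x => x) false

-- the 'for i in common_set: unique_lung.remove(i); unique_prot.remove(i)' loop;
-- remove raises KeyError when the element is absent → none
def removeLoop : List String → PySem.Set String → PySem.Set String → Option (PySem.Set String × PySem.Set String)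
  | [], u1, u2 => some (u1, u2)
  | i :: rest, u1, u2 =>
    match PySem.Set.remove? u1 i with
    | none => none
    | some u1' =>
      match PySem.Set.remove? u2 i with
      | none => none
      | some u2' => removeLoop rest u1' u2'

def unique_genes (dict1 : List (String × Int)) (dict2 : List (String × Int)) : List String × List String :=
  let common_set := common_genes dict1 dict2
  let unique_lung := PySem.Set.ofList (dict1.map Prod.fst)
  let unique_prot := PySem.Set.ofList (dict2.map Prod.fst)
  match removeLoop common_set unique_lung unique_prot with
  | some (u1, u2) =>
    (PySem.List.sorted u1 (fun x => x) false, PySem.List.sorted u2 (fun x => x) false)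
  | none => ([], [])  -- unreachable: each common element lies in both sets, so remove never raises

-- ===== PORT B =====
def unique_genes_alt (dict1 : List (String × Int)) (dict2 : List (String × Int)) : List String × List String :=
  let keys1 := PySem.Set.ofList (dict1.map Prod.fst)
  let keys2 := PySem.Set.ofList (dict2.map Prod.fst)
  (PySem.List.sorted (PySem.Set.diff keys1 keys2) (fun x => x) false,
   PySem.List.sorted (PySem.Set.diff keys2 keys1) (fun x => x) false)

-- ===== PRECONDITION & SPEC =====
def Spec_unique_genes (dict1 : List (String × Int)) (dict2 : List (String × Int)) (out : List String × List String) : Prop := out = unique_genes_alt dict1 dict2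
instance (dict1 : List (String × Int)) (dict2 : List (String × Int)) (out : List String × List String) : Decidable (Spec_unique_genes dict1 dict2 out) := by unfold Spec_unique_genes; infer_instance

-- ===== CLAIM (what is proved, stated in full; the proofs are below) =====
def Claim_equal_unique_genes : Prop := ∀ (dict1 : List (String × Int)) (dict2 : List (String × Int)), Dom_unique_genes dict1 dict2 → Spec_unique_genes dict1 dict2 (unique_genes dict1 dict2)

-- ===== LEMMAS AND PROOFS =====

-- key arithmetic of A's loop body on the set representation
theorem contains_discard (u : PySem.Set String) (a x : String)
    (h : u.contains x = true) (hxa : (x == a) = false) :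
    (PySem.Set.discard u a).contains x = true := by
  simp [PySem.Set.discard, List.mem_filter, hxa] at *
  exact h

theorem filter_discard (u : PySem.Set String) (a : String) (rest : List String) :
    List.filter (fun x => !List.contains rest x) (PySem.Set.discard u a)
      = List.filter (fun x => !List.contains (a :: rest) x) u := by
  simp only [PySem.Set.discard, List.filter_filter]
  congr 1
  funext x
  cases hxa : x == a <;> simp_all

-- A's remove loop never raises when the removed elements are distinct and present in
-- both sets, and it computes the filters dropping exactly those elements.
theorem removeLoop_eq_filter (l : List String) (u1 u2 : PySem.Set String)
    (hnd : l.Nodup) (h : ∀ x ∈ l, u1.contains x ∧ u2.contains x) :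
    removeLoop l u1 u2 =
      some (u1.filter (fun x => !l.contains x), u2.filter (fun x => !l.contains x)) := by
  induction l generalizing u1 u2 with
  | nil => simp [removeLoop]
  | cons a rest ih =>
    have ha := h a (by simp)
    have hxa : ∀ x ∈ rest, (x == a) = false := by
      intro x hx
      simp only [beq_eq_false_iff_ne, ne_eq]
      intro he; subst he; exact (List.nodup_cons.mp hnd).1 hx
    rw [removeLoop]
    simp only [PySem.Set.remove?, ha.1, ha.2, if_true]
    rw [ih (PySem.Set.discard u1 a) (PySem.Set.discard u2 a) hnd.of_cons
      (fun x hx => ⟨contains_discard u1 a x (h x (List.mem_cons_of_mem _ hx)).1 (hxa x hx),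
                   contains_discard u2 a x (h x (List.mem_cons_of_mem _ hx)).2 (hxa x hx)⟩)]
    rw [filter_discard, filter_discard]

theorem unique_genes_eq_alt (dict1 dict2 : List (String × Int)) :
    unique_genes dict1 dict2 = unique_genes_alt dict1 dict2 := by
  have hcmem : ∀ x, x ∈ common_genes dict1 dict2 ↔
      (x ∈ PySem.Set.ofList (dict1.map Prod.fst) ∧ x ∈ PySem.Set.ofList (dict2.map Prod.fst)) := by
    intro x
    simp [common_genes, PySem.List.mem_sorted, PySem.Set.inter, List.mem_filter,
      List.contains_eq_mem]
  have hnd : (common_genes dict1 dict2).Nodup := by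
    have hperm : (common_genes dict1 dict2).Perm
        (PySem.Set.inter (PySem.Set.ofList (dict1.map Prod.fst)) (PySem.Set.ofList (dict2.map Prod.fst))) :=
      PySem.List.sorted_perm _ _ _
    have hint : (PySem.Set.inter (PySem.Set.ofList (dict1.map Prod.fst))
        (PySem.Set.ofList (dict2.map Prod.fst))).Nodup :=
      List.Nodup.filter _ (PySem.Set.nodup_ofList _)
    exact hperm.symm.nodup hint
  have hrl := removeLoop_eq_filter (common_genes dict1 dict2)
      (PySem.Set.ofList (dict1.map Prod.fst)) (PySem.Set.ofList (dict2.map Prod.fst)) hnd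
      (fun x hx => by
        have := (hcmem x).mp hx
        simp [List.contains_eq_mem, this.1, this.2])
  have h1 : List.filter (fun x => !(common_genes dict1 dict2).contains x)
      (PySem.Set.ofList (dict1.map Prod.fst))
      = PySem.Set.diff (PySem.Set.ofList (dict1.map Prod.fst)) (PySem.Set.ofList (dict2.map Prod.fst)) := by
    apply List.filter_congr
    intro x hx
    have hm : (x ∈ common_genes dict1 dict2) ↔ x ∈ PySem.Set.ofList (dict2.map Prod.fst) := by
      rw [hcmem]; simp [hx]
    simp [PySem.Set.contains, List.contains_eq_mem, hm]
  have h2 : List.filter (fun x => !(common_genes dict1 dict2).contains x)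
      (PySem.Set.ofList (dict2.map Prod.fst))
      = PySem.Set.diff (PySem.Set.ofList (dict2.map Prod.fst)) (PySem.Set.ofList (dict1.map Prod.fst)) := by
    apply List.filter_congr
    intro x hx
    have hm : (x ∈ common_genes dict1 dict2) ↔ x ∈ PySem.Set.ofList (dict1.map Prod.fst) := by
      rw [hcmem]; simp [hx]
    simp [PySem.Set.contains, List.contains_eq_mem, hm]
  simp only [unique_genes, unique_genes_alt, hrl, h1, h2]

-- ===== VERDICT (by name: the statement is the Claim_ definition above) =====
theorem unique_genes_spec : Claim_equal_unique_genes := by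
  intro dict1 dict2 _
  exact unique_genes_eq_alt dict1 dict2
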